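-- pv_equiv track=rewrite | github.com/sfchronicle/ml-political-ads | helper.py | find_topic
-- ===== SOURCE A (Python) =====
-- def find_topic(x,lexicon):
--     topics= lexicon.keys()
--     if x=='no words':
--         return ''
--     if x != 'no words':
--         words = x.split(',')
--         labels = []
--         for t in topics:
--             terms = lexicon[t]
--             if set(words)&set(terms):
--                 labels.append(t)
--                 #l = sorted(labels)
--         return  ','.join(sorted(labels))
-- ===== SOURCE B (Python) =====
-- def find_topic(x, lexicon):
--     if x == 'no words':
--         return ''
--     index = {}
--     for topic, terms in lexicon.items():
--         for term in terms:
--             index.setdefault(term, set()).add(topic)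
--     found = set()
--     for w in x.split(','):
--         found |= index.get(w, set())
--     return ','.join(sorted(found))
-- ===== Notes on version B (the rewrite author's own statement) =====
-- stated objective: alternative
-- what changed: Replaces the per-topic set-intersection scan with an inverted index from term to the set of topics containing it, built in one pass over the lexicon, so each word becomes a single dict lookup instead of an intersection against every topic's terms.
import Mathlib
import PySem

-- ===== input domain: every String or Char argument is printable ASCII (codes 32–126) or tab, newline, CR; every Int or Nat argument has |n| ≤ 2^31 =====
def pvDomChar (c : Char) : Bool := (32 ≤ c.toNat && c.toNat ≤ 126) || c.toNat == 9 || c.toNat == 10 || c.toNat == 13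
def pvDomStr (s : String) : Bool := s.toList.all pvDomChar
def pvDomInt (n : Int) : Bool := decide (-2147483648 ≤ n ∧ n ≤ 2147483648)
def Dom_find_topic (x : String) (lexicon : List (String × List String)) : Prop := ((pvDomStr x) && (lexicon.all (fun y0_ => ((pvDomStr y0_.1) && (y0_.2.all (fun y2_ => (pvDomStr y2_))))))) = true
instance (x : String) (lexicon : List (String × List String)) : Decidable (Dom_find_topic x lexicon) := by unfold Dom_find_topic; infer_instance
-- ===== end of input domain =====

-- B replaces A's per-topic set-intersection scan by an inverted term→topics index built in one pass (alternative algorithm; speed not measured); return value only.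

-- ===== PORT A =====
-- scan every topic, test set(words) & set(terms) nonempty, collect labels, join sorted
def find_topic (x : String) (lexicon : List (String × List String)) : String :=
  let d := PySem.Dict.ofList lexicon
  let topics := d.keys
  if x = "no words" then "" else
    let words := (PySem.Str.split? x ",").getD []
    let labels := topics.foldl (fun labels t =>
      if PySem.Set.inter (PySem.Set.ofList words) (PySem.Set.ofList (d.getD t [])) ≠ [] then
        labels ++ [t]
      else labels) []
    PySem.Str.join "," (PySem.List.sorted labels (fun s => s) false)

-- ===== PORT B =====
-- build inverted index term → set of topics, then union the index entries of the words
def find_topic_alt (x : String) (lexicon : List (String × List String)) : String :=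
  if x = "no words" then "" else
    let d := PySem.Dict.ofList lexicon
    let index := d.items.foldl (fun idx p =>
        p.2.foldl (fun idx term =>
          idx.modify term [] (fun s => PySem.Set.add s p.1)) idx)
      PySem.Dict.empty
    let found := ((PySem.Str.split? x ",").getD []).foldl
      (fun s w => PySem.Set.union s (index.getD w [])) PySem.Set.empty
    PySem.Str.join "," (PySem.List.sorted found (fun s => s) false)

-- ===== PRECONDITION & SPEC =====
def Spec_find_topic (x : String) (lexicon : List (String × List String)) (out : String) : Prop := out = find_topic_alt x lexicon
instance (x : String) (lexicon : List (String × List String)) (out : String) : Decidable (Spec_find_topic x lexicon out) := by unfold Spec_find_topic; infer_instance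

-- ===== CLAIM (what is proved, stated in full; the proofs are below) =====
def Claim_equal_find_topic : Prop := ∀ (x : String) (lexicon : List (String × List String)), Dom_find_topic x lexicon → Spec_find_topic x lexicon (find_topic x lexicon)

-- ===== LEMMAS AND PROOFS =====

-- inner index-building loop: membership in the entry at w
theorem pv_inner_getD (a : String) (terms : List String) (idx : PySem.Dict String (PySem.Set String)) (w t : String) :
    t ∈ (terms.foldl (fun idx term => idx.modify term [] (fun s => PySem.Set.add s a)) idx).getD w []
    ↔ t ∈ idx.getD w [] ∨ (t = a ∧ w ∈ terms) := by
  induction terms generalizing idx with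
  | nil => simp
  | cons c rest ih =>
    simp only [List.foldl_cons, ih, PySem.Dict.getD_modify, List.mem_cons]
    by_cases h : w = c
    · simp [h]; tauto
    · simp [h]

-- outer index-building loop
theorem pv_index_getD (l : List (String × List String)) (idx : PySem.Dict String (PySem.Set String)) (w t : String) :
    t ∈ (l.foldl (fun idx p => p.2.foldl (fun idx term => idx.modify term [] (fun s => PySem.Set.add s p.1)) idx) idx).getD w []
    ↔ t ∈ idx.getD w [] ∨ ∃ p ∈ l, p.1 = t ∧ w ∈ p.2 := by
  induction l generalizing idx with
  | nil => simp
  | cons p rest ih =>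
    simp only [List.foldl_cons, ih, pv_inner_getD, List.mem_cons]
    constructor
    · rintro ((h | h) | h)
      · exact Or.inl h
      · exact Or.inr ⟨p, Or.inl rfl, h.1.symm, h.2⟩
      · obtain ⟨q, hq, hrest⟩ := h; exact Or.inr ⟨q, Or.inr hq, hrest⟩
    · rintro (h | ⟨q, (rfl | hq), h1, h2⟩)
      · exact Or.inl (Or.inl h)
      · exact Or.inl (Or.inr ⟨h1.symm, h2⟩)
      · exact Or.inr ⟨q, hq, h1, h2⟩

-- union-accumulating loop: membership
theorem pv_found_mem (index : PySem.Dict String (PySem.Set String)) (ws : List String) (acc : PySem.Set String) (t : String) :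
    t ∈ ws.foldl (fun s w => PySem.Set.union s (index.getD w [])) acc
    ↔ t ∈ acc ∨ ∃ w ∈ ws, t ∈ index.getD w [] := by
  induction ws generalizing acc with
  | nil => simp
  | cons w rest ih =>
    simp only [List.foldl_cons, ih, PySem.Set.mem_union, List.mem_cons]
    constructor
    · rintro ((h | h) | ⟨v, hv, ht⟩)
      · exact Or.inl h
      · exact Or.inr ⟨w, Or.inl rfl, h⟩
      · exact Or.inr ⟨v, Or.inr hv, ht⟩
    · rintro (h | ⟨v, (rfl | hv), ht⟩)
      · exact Or.inl (Or.inl h)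
      · exact Or.inl (Or.inr ht)
      · exact Or.inr ⟨v, hv, ht⟩

-- union-accumulating loop: nodup
theorem pv_found_nodup (index : PySem.Dict String (PySem.Set String)) (ws : List String) (acc : PySem.Set String) (h : acc.Nodup) :
    (ws.foldl (fun s w => PySem.Set.union s (index.getD w [])) acc).Nodup := by
  induction ws generalizing acc with
  | nil => exact h
  | cons w rest ih => exact ih _ (PySem.Set.nodup_union _ _ h)

-- A's label test characterised
theorem pv_label_test (words terms : List String) :
    PySem.Set.inter (PySem.Set.ofList words) (PySem.Set.ofList terms) ≠ []
    ↔ ∃ w ∈ words, w ∈ terms := by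
  constructor
  · intro h
    obtain ⟨y, hy⟩ := List.exists_mem_of_ne_nil _ h
    rw [PySem.Set.mem_inter, PySem.Set.mem_ofList, PySem.Set.mem_ofList] at hy
    exact ⟨y, hy.1, hy.2⟩
  · rintro ⟨w, hw, hwt⟩ hnil
    have hmem : w ∈ PySem.Set.inter (PySem.Set.ofList words) (PySem.Set.ofList terms) := by
      rw [PySem.Set.mem_inter, PySem.Set.mem_ofList, PySem.Set.mem_ofList]
      exact ⟨hw, hwt⟩
    rw [hnil] at hmem
    exact absurd hmem (List.not_mem_nil)

-- items ∋ (t, ·∋w)  ↔  t ∈ keys ∧ w ∈ getD t []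
theorem pv_items_bridge (d : PySem.Dict String (List String)) (hnd : d.keys.Nodup) (w t : String) :
    (∃ p ∈ d.items, p.1 = t ∧ w ∈ p.2) ↔ t ∈ d.keys ∧ w ∈ d.getD t [] := by
  constructor
  · rintro ⟨⟨k, v⟩, hp, rfl, hwv⟩
    exact ⟨PySem.Dict.mem_keys_of_mem_items d hp,
      by rw [PySem.Dict.getD_of_mem_items d hp hnd]; exact hwv⟩
  · rintro ⟨hk, hwv⟩
    have hc : d.contains t = true := (PySem.Dict.contains_iff_mem_keys d t).mpr hk
    rw [PySem.Dict.contains_eq_isSome_get?] at hc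
    obtain ⟨v, hv⟩ := Option.isSome_iff_exists.mp hc
    refine ⟨(t, v), (PySem.Dict.get?_eq_some_iff_mem_items d t v hnd).mp hv, rfl, ?_⟩
    rwa [PySem.Dict.getD_of_get?_eq_some d [] hv] at hwv

-- ===== VERDICT (by name: the statement is the Claim_ definition above) =====
theorem find_topic_spec : Claim_equal_find_topic := by
  intro x lexicon _
  unfold Spec_find_topic find_topic find_topic_alt
  by_cases hx : x = "no words"
  · simp [hx]
  · simp only [if_neg hx]
    congr 1
    rw [PySem.List.sorted_id_eq_sorted_id_iff_perm,
        PySem.List.foldl_append_ite_eq_filter, List.nil_append]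
    have hnd : (PySem.Dict.ofList lexicon).keys.Nodup := PySem.Dict.nodup_keys_ofList lexicon
    refine (List.perm_ext_iff_of_nodup (hnd.filter _)
        (pv_found_nodup _ _ PySem.Set.empty List.nodup_nil)).mpr ?_
    intro t
    rw [List.mem_filter, pv_found_mem]
    simp only [decide_eq_true_eq, pv_label_test, List.not_mem_nil, false_or,
      pv_index_getD, PySem.Dict.getD_empty, List.not_mem_nil, false_or]
    constructor
    · rintro ⟨hk, w, hw, hwt⟩
      exact Or.inr ⟨w, hw, (pv_items_bridge _ hnd w t).mpr ⟨hk, hwt⟩⟩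
    · rintro (hmem | ⟨w, hw, h⟩)
      · exact absurd hmem List.not_mem_nil
      · obtain ⟨hk, hwt⟩ := (pv_items_bridge _ hnd w t).mp h
        exact ⟨hk, w, hw, hwt⟩
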